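-- pv_equiv track=rewrite | github.com/chebozh/coding_challenges_solutions | codewars_solutions/Dashatize_it.py | dashatize
-- ===== SOURCE A (Python) =====
-- def dashatize(num):
--     if num is None:
--         return 'None'
--     elif num < 0:
--         num *= -1
--
--     nums_s_l = [x for x in str(num)]
--     if len(nums_s_l) == 1:
--         return nums_s_l[0]
--
--     result = ''
--     for x in nums_s_l:
--         if int(x) % 2 != 0:
--             result += '-' + x + '-' if not result.endswith('-') else x + '-'
--         else:
--             result += x
--
--     if result.startswith('-') and result.endswith('-'):
--         return result[1:len(result) - 1]
--     elif result.startswith('-'):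
--         return result[1:]
--     elif result.endswith('-'):
--         return result[:len(result) - 1]
--     else:
--         return result
-- ===== SOURCE B (Python) =====
-- def dashatize(num):
--     if num is None:
--         return 'None'
--     # pass 1: wrap every odd digit in dashes
--     raw = ''.join('-' + c + '-' if int(c) % 2 else c for c in str(abs(num)))
--     # pass 2: collapse runs of dashes
--     out = []
--     for c in raw:
--         if c == '-' and out and out[-1] == '-':
--             continue
--         out.append(c)
--     # pass 3: strip boundary dashes
--     return ''.join(out).strip('-')
-- ===== Notes on version B (the rewrite author's own statement) =====
-- stated objective: idiomatic
-- what changed: Replaces A's stateful endswith-driven loop, length-1 special case and four startswith/endswith strip branches with a three-pass pipeline: wrap every odd digit in dashes, collapse adjacent dashes, strip boundary dashes.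
import Mathlib
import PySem

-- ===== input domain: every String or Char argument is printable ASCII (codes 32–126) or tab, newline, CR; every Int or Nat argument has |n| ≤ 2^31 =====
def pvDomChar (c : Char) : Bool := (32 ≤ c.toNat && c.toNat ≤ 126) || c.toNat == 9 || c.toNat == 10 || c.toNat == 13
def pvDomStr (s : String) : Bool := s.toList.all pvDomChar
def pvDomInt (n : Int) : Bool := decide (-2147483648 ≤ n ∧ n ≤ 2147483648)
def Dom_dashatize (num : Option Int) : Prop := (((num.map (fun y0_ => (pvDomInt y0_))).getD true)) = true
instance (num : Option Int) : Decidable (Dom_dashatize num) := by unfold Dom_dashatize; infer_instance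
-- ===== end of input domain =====

-- B replaces A's stateful endswith-driven loop, length-1 special case and four strip branches with a wrap / collapse-dashes / strip-boundary pipeline; same cost, plainer shape.

-- ===== PORT A =====
-- loop body of A's for-loop, named for the proofs; '(x.toNat - 48) % 2 ≠ 0' is 'int(x) % 2 != 0', exact on the digit characters str(num) produces
def dashaStepA (r : List Char) (x : Char) : List Char :=
  if (x.toNat - 48) % 2 ≠ 0 then
    if ¬ (PySem.Chars.endswith r ['-'] = true) then r ++ ['-', x, '-'] else r ++ [x, '-']
  else r ++ [x]

def dashatize (num : Option Int) : String :=
  match num with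
  | none => "None"
  | some num0 =>
    let num1 := if num0 < 0 then num0 * (-1) else num0
    let numsSL := PySem.Int.toChars num1              -- [x for x in str(num)]
    if numsSL.length = 1 then String.ofList numsSL    -- nums_s_l[0]: under the guard the list is exactly that one character
    else
      let result := numsSL.foldl dashaStepA []
      if PySem.Chars.startswith result ['-'] = true ∧ PySem.Chars.endswith result ['-'] = true then
        String.ofList (PySem.List.slice result (some 1) (some ((result.length : Int) - 1)))
      else if PySem.Chars.startswith result ['-'] = true then
        String.ofList (PySem.List.slice result (some 1) none)
      else if PySem.Chars.endswith result ['-'] = true then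
        String.ofList (PySem.List.slice result none (some ((result.length : Int) - 1)))
      else
        String.ofList result

-- ===== PORT B =====
-- '-' + c + '-' if int(c) % 2 else c   (parity test exact on digit characters, as in port A)
def dashaWrapB (c : Char) : List Char :=
  if (c.toNat - 48) % 2 ≠ 0 then ['-', c, '-'] else [c]

-- body of B's collapse loop: skip a dash that follows a dash
def dashaStepB (out : List Char) (c : Char) : List Char :=
  if c = '-' ∧ out ≠ [] ∧ out.getLast? = some '-' then out else out ++ [c]

def dashatize_alt (num : Option Int) : String :=
  match num with
  | none => "None"
  | some n =>
    let raw := (PySem.Int.toChars |n|).flatMap dashaWrapB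
    let out := raw.foldl dashaStepB []
    String.ofList (PySem.Chars.stripChars out ['-'])

-- ===== PRECONDITION & SPEC =====
def Spec_dashatize (num : Option Int) (out : String) : Prop := out = dashatize_alt num
instance (num : Option Int) (out : String) : Decidable (Spec_dashatize num out) := by unfold Spec_dashatize; infer_instance

-- ===== CLAIM (what is proved, stated in full; the proofs are below) =====
def Claim_equal_dashatize : Prop := ∀ (num : Option Int), Dom_dashatize num → Spec_dashatize num (dashatize num)

-- ===== LEMMAS AND PROOFS =====

-- "no two adjacent dashes"
def NoDD (l : List Char) : Prop := l.IsChain (fun a b => ¬(a = '-' ∧ b = '-'))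

theorem endswith_dash_iff (r : List Char) :
    PySem.Chars.endswith r ['-'] = true ↔ r.getLast? = some '-' := by
  rw [PySem.Chars.endswith_iff]
  constructor
  · rintro ⟨t, rfl⟩; simp
  · intro h; obtain ⟨l', rfl⟩ := List.getLast?_eq_some_iff.1 h; exact ⟨l', rfl⟩

theorem startswith_dash_iff (r : List Char) :
    PySem.Chars.startswith r ['-'] = true ↔ r.head? = some '-' := by
  rw [PySem.Chars.startswith_iff]
  constructor
  · rintro ⟨t, rfl⟩; rfl
  · intro h; cases r with
    | nil => simp at h
    | cons a t => simp at h; subst h; exact ⟨t, rfl⟩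

theorem foldl_flatMap_eq {α β γ : Type} (l : List α) (g : α → List β) (f : γ → β → γ) (i : γ) :
    (l.flatMap g).foldl f i = l.foldl (fun a x => (g x).foldl f a) i := by
  induction l generalizing i with
  | nil => rfl
  | cons h t ih => simp [List.flatMap_cons, List.foldl_append, ih]

theorem stepB_dash_pos (r : List Char) (he : r.getLast? = some '-') : dashaStepB r '-' = r := by
  unfold dashaStepB
  exact if_pos ⟨rfl, by rintro rfl; simp at he, he⟩

theorem stepB_dash_neg (r : List Char) (he : ¬ r.getLast? = some '-') :
    dashaStepB r '-' = r ++ ['-'] := by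
  unfold dashaStepB; exact if_neg (by tauto)

theorem stepB_ne (r : List Char) (x : Char) (hx : x ≠ '-') : dashaStepB r x = r ++ [x] := by
  unfold dashaStepB; exact if_neg (by simp [hx])

-- B's collapse loop run over one wrapped digit is exactly one iteration of A's loop
theorem stepB_wrap_eq (r : List Char) (x : Char) (hx : x ≠ '-') :
    (dashaWrapB x).foldl dashaStepB r = dashaStepA r x := by
  unfold dashaWrapB dashaStepA
  by_cases hodd : (x.toNat - 48) % 2 ≠ 0
  · rw [if_pos hodd, if_pos hodd]
    show dashaStepB (dashaStepB (dashaStepB r '-') x) '-' = _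
    by_cases he : r.getLast? = some '-'
    · rw [stepB_dash_pos r he, stepB_ne r x hx,
        stepB_dash_neg _ (by simp [hx]), if_neg (by simp [endswith_dash_iff, he])]
      simp
    · rw [stepB_dash_neg r he, stepB_ne _ x hx,
        stepB_dash_neg _ (by simp [hx]), if_pos (by simp [endswith_dash_iff, he])]
      simp
  · rw [if_neg hodd, if_neg hodd]
    show dashaStepB r x = _
    exact stepB_ne r x hx

theorem stepA_noDD (r : List Char) (x : Char) (hx : x ≠ '-') (h : NoDD r) :
    NoDD (dashaStepA r x) := by
  have hsub : ∀ (s : List Char), s.IsChain (fun a b => ¬(a = '-' ∧ b = '-')) →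
      (∀ a ∈ r.getLast?, ∀ b ∈ s.head?, ¬(a = '-' ∧ b = '-')) → NoDD (r ++ s) :=
    fun s hs hb => List.isChain_append.2 ⟨h, hs, hb⟩
  unfold dashaStepA
  by_cases hodd : (x.toNat - 48) % 2 ≠ 0
  · rw [if_pos hodd]
    by_cases he : PySem.Chars.endswith r ['-'] = true
    · rw [if_neg (not_not_intro he)]
      apply hsub
      · simp [List.isChain_cons_cons, hx]
      · intro a ha b hb
        simp only [List.head?_cons, Option.mem_def, Option.some.injEq] at hb
        subst hb
        rintro ⟨-, h2⟩
        exact hx h2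
    · rw [if_pos he]
      apply hsub
      · simp [List.isChain_cons_cons, hx]
      · intro a ha b hb
        simp only [List.head?_cons, Option.mem_def, Option.some.injEq] at hb
        subst hb
        rw [endswith_dash_iff] at he
        rintro ⟨rfl, -⟩
        exact he ha
  · rw [if_neg hodd]
    apply hsub
    · simp
    · intro a ha b hb
      simp only [List.head?_cons, Option.mem_def, Option.some.injEq] at hb
      subst hb
      rintro ⟨-, h2⟩
      exact hx h2

theorem foldl_stepA_noDD (L : List Char) (r : List Char) (hL : ∀ x ∈ L, x ≠ '-')
    (h : NoDD r) : NoDD (L.foldl dashaStepA r) := by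
  induction L generalizing r with
  | nil => exact h
  | cons a t ih =>
    exact ih _ (fun x hx => hL x (List.mem_cons_of_mem _ hx))
      (stepA_noDD r a (hL a List.mem_cons_self) h)

theorem prefix_stepA (r : List Char) (x : Char) : r <+: dashaStepA r x := by
  unfold dashaStepA; split_ifs <;> exact ⟨_, rfl⟩

theorem prefix_foldl_stepA (L : List Char) (r : List Char) : r <+: L.foldl dashaStepA r := by
  induction L generalizing r with
  | nil => exact List.prefix_refl r
  | cons a t ih => exact (prefix_stepA r a).trans (ih _)

theorem mem_stepA_self (r : List Char) (x : Char) : x ∈ dashaStepA r x := by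
  unfold dashaStepA; split_ifs <;> simp

theorem digitChar_ne_dash (n : Nat) (h : n < 10) : Nat.digitChar n ≠ '-' := by
  interval_cases n <;> decide

theorem toDigitsCore_succ (b f n : Nat) (ds : List Char) :
    Nat.toDigitsCore b (f+1) n ds =
      if n / b = 0 then (n % b).digitChar :: ds else Nat.toDigitsCore b f (n / b) ((n % b).digitChar :: ds) := rfl

theorem toDigitsCore_mem (f : Nat) : ∀ (n : Nat) (acc : List Char), (∀ c ∈ acc, c ≠ '-') →
    ∀ c ∈ Nat.toDigitsCore 10 f n acc, c ≠ '-' := by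
  induction f with
  | zero => intro n acc h; exact h
  | succ f ih =>
    intro n acc h c hc
    rw [toDigitsCore_succ] at hc
    split_ifs at hc with h0
    · rcases List.mem_cons.1 hc with rfl | hm
      · exact digitChar_ne_dash _ (Nat.mod_lt _ (by norm_num))
      · exact h c hm
    · exact ih _ _ (by
        intro d hd
        rcases List.mem_cons.1 hd with rfl | hm
        · exact digitChar_ne_dash _ (Nat.mod_lt _ (by norm_num))
        · exact h d hm) c hc

theorem toDigitsCore_ne_nil (f : Nat) : ∀ (n : Nat) (acc : List Char), acc ≠ [] →
    Nat.toDigitsCore 10 f n acc ≠ [] := by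
  induction f with
  | zero => intro n acc h; exact h
  | succ f ih =>
    intro n acc h
    rw [toDigitsCore_succ]
    split_ifs with h0
    · simp
    · exact ih _ _ (by simp)

theorem toChars_nonneg_ne_dash (n : Int) (hn : 0 ≤ n) :
    ∀ c ∈ PySem.Int.toChars n, c ≠ '-' := by
  unfold PySem.Int.toChars
  rw [if_neg (by omega)]
  exact toDigitsCore_mem _ _ _ (by simp)

theorem toChars_ne_nil (n : Int) (hn : 0 ≤ n) : PySem.Int.toChars n ≠ [] := by
  unfold PySem.Int.toChars
  rw [if_neg (by omega)]
  unfold Nat.toDigits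
  rw [toDigitsCore_succ]
  split_ifs with h0
  · simp
  · exact toDigitsCore_ne_nil _ _ _ (by simp)

-- Python-strip's dropWhile removes at most the single boundary dash of a dash-collapsed list
theorem dropWhile_dash (R : List Char) (h : NoDD R) (hx : ∃ c ∈ R, c ≠ '-') :
    R.dropWhile (fun c => (['-'] : List Char).contains c) =
      (if R.head? = some '-' then R.tail else R) := by
  cases R with
  | nil => simp at hx
  | cons a t =>
    by_cases ha : a = '-'
    · subst ha
      rw [if_pos (show ('-' :: t : List Char).head? = some '-' from rfl)]
      cases t with
      | nil => simp at hx
      | cons b t' =>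
        have hb : b ≠ '-' := by
          unfold NoDD at h
          rw [List.isChain_cons_cons] at h
          intro hb; exact h.1 ⟨rfl, hb⟩
        simp [List.dropWhile, hb]
    · rw [if_neg (by simp [ha])]
      simp [List.dropWhile, ha]

theorem stripChars_dash (R : List Char) (h : NoDD R) (hx : ∃ c ∈ R, c ≠ '-') :
    PySem.Chars.stripChars R ['-'] =
      (if (if R.head? = some '-' then R.tail else R).getLast? = some '-'
       then (if R.head? = some '-' then R.tail else R).dropLast
       else (if R.head? = some '-' then R.tail else R)) := by
  show (List.dropWhile _ (List.dropWhile _ R).reverse).reverse = _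
  rw [dropWhile_dash R h hx]
  set R1 := if R.head? = some '-' then R.tail else R with hR1
  have h1 : NoDD R1 := by
    rw [hR1]; split_ifs
    · exact List.IsChain.tail h
    · exact h
  have hx1 : ∃ c ∈ R1, c ≠ '-' := by
    obtain ⟨c, hc, hcd⟩ := hx
    refine ⟨c, ?_, hcd⟩
    rw [hR1]; split_ifs with hh
    · cases R with
      | nil => simp at hc
      | cons a t =>
        simp only [List.head?_cons, Option.some.injEq] at hh
        subst hh
        rcases List.mem_cons.1 hc with rfl | hm
        · exact absurd rfl hcd
        · exact hm
    · exact hc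
  have h1r : NoDD R1.reverse := by
    unfold NoDD at h1 ⊢
    rw [List.isChain_reverse]
    exact h1.imp_of_mem_imp (by tauto)
  have hx1r : ∃ c ∈ R1.reverse, c ≠ '-' := by
    obtain ⟨c, hc, hcd⟩ := hx1; exact ⟨c, List.mem_reverse.2 hc, hcd⟩
  rw [dropWhile_dash R1.reverse h1r hx1r]
  rw [List.head?_reverse]
  split_ifs with hl
  · rw [List.tail_reverse, List.reverse_reverse]
  · simp

-- ===== VERDICT (by name: the statement is the Claim_ definition above) =====
theorem dashatize_spec : Claim_equal_dashatize := by
  intro num _hdom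
  unfold Spec_dashatize
  cases num with
  | none => rfl
  | some n0 =>
    have habs : (if n0 < 0 then n0 * (-1) else n0) = |n0| := by
      split_ifs with h
      · rw [abs_of_neg h]; ring
      · rw [abs_of_nonneg (by omega)]
    have h0 : (0 : Int) ≤ |n0| := abs_nonneg n0
    have hdash : ∀ c ∈ PySem.Int.toChars |n0|, c ≠ '-' := toChars_nonneg_ne_dash _ h0
    have hnil : PySem.Int.toChars |n0| ≠ [] := toChars_ne_nil _ h0
    -- B's collapse of the wrapped digits is A's loop
    have hB : dashatize_alt (some n0) =
        String.ofList (PySem.Chars.stripChars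
          ((PySem.Int.toChars |n0|).foldl dashaStepA []) ['-']) := by
      show String.ofList (PySem.Chars.stripChars
          (((PySem.Int.toChars |n0|).flatMap dashaWrapB).foldl dashaStepB []) ['-']) = _
      rw [foldl_flatMap_eq,
        PySem.List.foldl_congr_mem _ _ dashaStepA _
          (fun acc x hx => stepB_wrap_eq acc x (hdash x hx))]
    rw [hB]
    set L := PySem.Int.toChars |n0| with hdefL
    set R := L.foldl dashaStepA [] with hdefR
    have hNoDD : NoDD R := foldl_stepA_noDD L [] hdash (by constructor)
    have hmem : ∃ c ∈ R, c ≠ '-' := by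
      obtain ⟨d, t, hLdt⟩ : ∃ d t, L = d :: t := by
        cases hL : L with
        | nil => exact absurd hL hnil
        | cons a s => exact ⟨a, s, rfl⟩
      have hd : d ≠ '-' := hdash d (by rw [hLdt]; exact List.mem_cons_self)
      refine ⟨d, ?_, hd⟩
      have hpre : dashaStepA [] d <+: R := by
        rw [hdefR, hLdt, List.foldl_cons]
        exact prefix_foldl_stepA t _
      exact hpre.subset (mem_stepA_self [] d)
    rw [stripChars_dash R hNoDD hmem]
    show dashatize (some n0) = _
    simp only [dashatize, habs, ← hdefL, ← hdefR]
    by_cases h1 : L.length = 1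
    · rw [if_pos h1]
      obtain ⟨d, hLd⟩ := List.length_eq_one_iff.1 h1
      have hd : d ≠ '-' := hdash d (by rw [hLd]; exact List.mem_cons_self)
      have hRd : R = dashaStepA [] d := by rw [hdefR, hLd]; rfl
      have hstep : dashaStepA [] d = if (d.toNat - 48) % 2 ≠ 0 then ['-', d, '-'] else [d] := by
        unfold dashaStepA
        simp [show PySem.Chars.endswith [] ['-'] = false from rfl]
      rw [hLd, hRd, hstep]
      by_cases hodd : (d.toNat - 48) % 2 ≠ 0
      · rw [if_pos hodd]
        simp
      · rw [if_neg hodd]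
        simp [hd]
    · rw [if_neg h1]
      have hRne : R ≠ [] := by rintro h; obtain ⟨c, hc, -⟩ := hmem; rw [h] at hc; simp at hc
      by_cases hs : PySem.Chars.startswith R ['-'] = true
      · have hhead : R.head? = some '-' := (startswith_dash_iff R).1 hs
        obtain ⟨u, hRu⟩ : ∃ u, R = '-' :: u := by
          cases hR : R with
          | nil => exact absurd hR hRne
          | cons a s =>
            rw [hR] at hhead; simp at hhead; subst hhead; exact ⟨s, rfl⟩
        have hune : u ≠ [] := by
          rintro rfl
          obtain ⟨c, hc, hcd⟩ := hmem
          rw [hRu] at hc; simp at hc; exact hcd hc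
        obtain ⟨b, u', hub⟩ : ∃ b u', u = b :: u' := by
          cases hu : u with
          | nil => exact absurd hu hune
          | cons b u' => exact ⟨b, u', rfl⟩
        by_cases he : PySem.Chars.endswith R ['-'] = true
        · rw [if_pos ⟨hs, he⟩]
          have hlast : R.getLast? = some '-' := (endswith_dash_iff R).1 he
          have hlastu : u.getLast? = some '-' := by
            rw [hRu, hub, List.getLast?_cons_cons] at hlast; rw [hub]; exact hlast
          have hblen : ((R.length : Int) - 1) = ((u.length : Nat) : Int) := by
            rw [hRu, List.length_cons]; push_cast; ring
          rw [hblen, hRu, PySem.List.slice_toNat (ha := by norm_num) (hb := Int.natCast_nonneg u.length)]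
          simp [hlastu, List.dropLast_eq_take]
        · rw [if_neg (by tauto), if_pos hs]
          have hlast : ¬ R.getLast? = some '-' := fun hl => he ((endswith_dash_iff R).2 hl)
          have hlastu : ¬ u.getLast? = some '-' := by
            rw [hRu, hub, List.getLast?_cons_cons] at hlast; rw [hub]; exact hlast
          rw [hRu, PySem.List.slice_from (ha := by norm_num)]
          simp [hlastu]
      · have hhead : ¬ R.head? = some '-' := fun hh => hs ((startswith_dash_iff R).2 hh)
        by_cases he : PySem.Chars.endswith R ['-'] = true
        · rw [if_neg (by tauto), if_neg hs, if_pos he]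
          have hlast : R.getLast? = some '-' := (endswith_dash_iff R).1 he
          have hlen1 : 1 ≤ R.length := by
            cases hR : R with
            | nil => exact absurd hR hRne
            | cons a s => simp
          have htn : ((R.length : Int) - 1).toNat = R.length - 1 := by omega
          rw [PySem.List.slice_to (hb := by omega), htn, ← List.dropLast_eq_take]
          simp [hhead, hlast]
        · rw [if_neg (by tauto), if_neg hs, if_neg he]
          have hlast : ¬ R.getLast? = some '-' := fun hl => he ((endswith_dash_iff R).2 hl)
          simp only [if_neg hhead, if_neg hlast]
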